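-- pv_equiv track=rewrite | github.com/karanpshah/Pers-GamesCrafters | 1st-HW-CoinsSolver.py | solve
-- ===== SOURCE A (Python) =====
-- def do_move(posn, adv):
--     return posn - adv
--
-- def game_over(posn):
--     if posn > 0 and posn <= 10:
--         return False
--     else:
--         return True
--
-- def generate_moves(posn):
--     if posn == 1:
--         return [1]
--     else:
--         return [1,2]
--
-- def solve(posn):
--
--     if not (game_over(posn)):
--
--         if (posn == 1) or (posn == 2):
--             return 'W'
--
--         else:
--             moves_lst = generate_moves(posn)
--             outcomes_lst = [solve(do_move(posn, move)) for move in moves_lst]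
--
--             lst_len = len(outcomes_lst)
--             index = 0
--             L_present = False
--
--             while index < lst_len:
--
--                 if (outcomes_lst[index] == 'L'):
--                     # Can send opponent to losing position
--                     L_present = True
--
--                 index+= 1;
--
--             if (L_present == True):
--                 # If can send opponent to losing position,
--                 # this is a winning position. Ret. 'W'
--                 return 'W'
--             else:
--                 return 'L'
-- ===== SOURCE B (Python) =====
-- def solve(posn):
--     if posn <= 0 or posn > 10:
--         return None
--     return 'L' if posn % 3 == 0 else 'W'
-- ===== Notes on version B (the rewrite author's own statement) =====
-- stated objective: simpler
-- what changed: Replaces the branching recursion over the -1/-2 move tree with the closed form derived from it: integer positions 1..10 are losing exactly when divisible by 3, out-of-range positions return None.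
import Mathlib
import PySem

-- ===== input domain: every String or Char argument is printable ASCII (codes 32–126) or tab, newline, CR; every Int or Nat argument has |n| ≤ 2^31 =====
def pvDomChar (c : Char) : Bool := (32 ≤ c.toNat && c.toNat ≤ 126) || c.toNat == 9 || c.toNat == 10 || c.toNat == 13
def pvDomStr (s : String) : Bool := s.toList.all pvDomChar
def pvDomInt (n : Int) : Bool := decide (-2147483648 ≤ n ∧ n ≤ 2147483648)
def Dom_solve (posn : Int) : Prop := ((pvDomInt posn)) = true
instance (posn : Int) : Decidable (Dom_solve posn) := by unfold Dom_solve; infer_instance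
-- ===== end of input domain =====

-- B replaces A's branching -1/-2 recursion with its closed form: in 1..10, 'L' iff posn % 3 == 0, else 'W'; None outside; objective: simpler.


-- ===== PORT A =====
def do_move (posn adv : Int) : Int := posn - adv

def game_over (posn : Int) : Bool :=
  if posn > 0 && posn ≤ 10 then false else true

def generate_moves (posn : Int) : List Int :=
  if posn = 1 then [1] else [1, 2]

-- Literal port of A's recursion; the while-loop scanning outcomes_lst for 'L'
-- is the foldl over the same list (same order, same flag L_present).
def solve (posn : Int) : Option String :=
  if ¬ (game_over posn) then
    if (posn = 1) ∨ (posn = 2) then some "W"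
    else
      let moves_lst := generate_moves posn
      let outcomes_lst := moves_lst.attach.map (fun m => solve (do_move posn m.1))
      let L_present := outcomes_lst.foldl
        (fun acc o => if o = some "L" then true else acc) false
      if L_present = true then some "W" else some "L"
  else none
termination_by posn.toNat
decreasing_by
  all_goals {
    rename_i hgo hne
    simp [game_over] at hgo
    have hmem : (m.1 : Int) ∈ generate_moves posn := m.2
    simp [do_move]
    by_cases hp : posn = 1 <;> simp [generate_moves, hp] at hmem <;> omega
  }

-- ===== PORT B =====
def solve_alt (posn : Int) : Option String :=
  if posn ≤ 0 ∨ posn > 10 then none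
  else if posn % 3 = 0 then some "L" else some "W"

-- ===== PRECONDITION & SPEC =====
def Spec_solve (posn : Int) (out : Option String) : Prop := out = solve_alt posn
instance (posn : Int) (out : Option String) : Decidable (Spec_solve posn out) := by unfold Spec_solve; infer_instance

-- ===== CLAIM (what is proved, stated in full; the proofs are below) =====
def Claim_equal_solve : Prop := ∀ (posn : Int), Dom_solve posn → Spec_solve posn (solve posn)

-- ===== LEMMAS AND PROOFS =====

theorem solve_out {posn : Int} (h : posn ≤ 0 ∨ posn > 10) : solve posn = none := by
  rw [solve]
  have : game_over posn = true := by simp [game_over]; omega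
  simp [this]

theorem solve_v1 : solve 1 = some "W" := by
  rw [solve]; norm_num [game_over]

theorem solve_v2 : solve 2 = some "W" := by
  rw [solve]; norm_num [game_over]

theorem solve_v3 : solve 3 = some "L" := by
  rw [solve, show generate_moves 3 = [1, 2] from rfl]
  norm_num [game_over, do_move, solve_v2, solve_v1]

theorem solve_v4 : solve 4 = some "W" := by
  rw [solve, show generate_moves 4 = [1, 2] from rfl]
  norm_num [game_over, do_move, solve_v3, solve_v2]

theorem solve_v5 : solve 5 = some "W" := by
  rw [solve, show generate_moves 5 = [1, 2] from rfl]
  norm_num [game_over, do_move, solve_v4, solve_v3]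

theorem solve_v6 : solve 6 = some "L" := by
  rw [solve, show generate_moves 6 = [1, 2] from rfl]
  norm_num [game_over, do_move, solve_v5, solve_v4]

theorem solve_v7 : solve 7 = some "W" := by
  rw [solve, show generate_moves 7 = [1, 2] from rfl]
  norm_num [game_over, do_move, solve_v6, solve_v5]

theorem solve_v8 : solve 8 = some "W" := by
  rw [solve, show generate_moves 8 = [1, 2] from rfl]
  norm_num [game_over, do_move, solve_v7, solve_v6]

theorem solve_v9 : solve 9 = some "L" := by
  rw [solve, show generate_moves 9 = [1, 2] from rfl]
  norm_num [game_over, do_move, solve_v8, solve_v7]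

theorem solve_v10 : solve 10 = some "W" := by
  rw [solve, show generate_moves 10 = [1, 2] from rfl]
  norm_num [game_over, do_move, solve_v9, solve_v8]

-- ===== VERDICT (by name: the statement is the Claim_ definition above) =====
theorem solve_spec : Claim_equal_solve := by
  intro posn _
  unfold Spec_solve
  by_cases h : posn ≤ 0 ∨ posn > 10
  · rw [solve_out h]
    unfold solve_alt
    simp [h]
  · push Not at h
    obtain ⟨h1,h2⟩ := h; interval_cases posn <;>
      simp [solve_alt, solve_v1, solve_v2, solve_v3, solve_v4, solve_v5,
        solve_v6, solve_v7, solve_v8, solve_v9, solve_v10]
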